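-- pv_equiv track=rewrite | github.com/cfmessias/passatempos | WOW2.py | gerar_combinacoes_letras
-- ===== SOURCE A (Python) =====
-- import itertools
--
-- def gerar_combinacoes_letras(letras, tamanho=None):
--     todas_combinacoes = []
--     if tamanho is not None:
--         combinacoes = itertools.combinations(letras, tamanho)
--         todas_combinacoes = [''.join(c) for c in combinacoes]
--     else:
--         for i in range(1, len(letras) + 1):
--             combinacoes = itertools.combinations(letras, i)
--             todas_combinacoes.extend(''.join(c) for c in combinacoes)
--     return todas_combinacoes
-- ===== SOURCE B (Python) =====
-- def gerar_combinacoes_letras(letras, tamanho=None):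
--     xs = list(letras)
--     n = len(xs)
--
--     def combos(k):
--         # breadth-first: level holds (chars picked so far, next index allowed)
--         level = [((), 0)]
--         for _ in range(k):
--             level = [(t + (xs[i],), i + 1)
--                      for (t, start) in level
--                      for i in range(start, n)]
--         return [''.join(t) for (t, _) in level]
--
--     if tamanho is not None:
--         if tamanho < 0:
--             raise ValueError("tamanho must be non-negative")
--         return combos(tamanho)
--     return [s for k in range(1, n + 1) for s in combos(k)]
-- ===== Notes on version B (the rewrite author's own statement) =====
-- stated objective: alternative
-- what changed: Replaces itertools.combinations (recursive/lazy combinatorial generation) by an iterative breadth-first level expansion: a list of (partial tuple, next index) pairs is widened k times, reproducing the exact combinations order; the tamanho=None case becomes one flat comprehension.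
import Mathlib
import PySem

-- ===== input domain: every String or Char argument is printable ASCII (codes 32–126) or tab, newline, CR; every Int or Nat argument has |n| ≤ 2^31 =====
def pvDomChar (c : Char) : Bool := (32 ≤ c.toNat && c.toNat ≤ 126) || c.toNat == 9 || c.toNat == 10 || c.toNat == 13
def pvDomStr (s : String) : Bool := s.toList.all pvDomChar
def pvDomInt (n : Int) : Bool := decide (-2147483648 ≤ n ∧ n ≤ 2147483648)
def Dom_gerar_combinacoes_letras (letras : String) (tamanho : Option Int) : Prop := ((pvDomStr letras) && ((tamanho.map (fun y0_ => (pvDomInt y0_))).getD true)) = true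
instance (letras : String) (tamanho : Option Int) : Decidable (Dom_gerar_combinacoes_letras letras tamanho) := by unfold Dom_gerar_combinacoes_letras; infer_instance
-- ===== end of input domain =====

-- B replaces itertools.combinations by an iterative breadth-first level expansion over
-- (partial-tuple, next-index) pairs — same output values and order, same asymptotic cost.
-- ===== PORT A =====
-- itertools.combinations(pool, r) in pool order: the canonical recursive definition
-- produces exactly itertools' output order (pick the head first, then skip it).
def pvCombA : Nat → List Char → List (List Char)
  | 0, _ => [[]]
  | _ + 1, [] => []
  | r + 1, c :: rest => (pvCombA r rest).map (fun t => c :: t) ++ pvCombA (r + 1) rest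

def gerar_combinacoes_letras (letras : String) (tamanho : Option Int) : List String :=
  match tamanho with
  | some t => (pvCombA t.toNat letras.toList).map String.mk
  | none =>
      (List.range' 1 letras.toList.length).foldl
        (fun acc i => acc ++ (pvCombA i letras.toList).map String.mk) []

-- ===== PORT B =====
-- one widening step of the breadth-first level: each (picked, start) pair spawns
-- (picked ++ [xs[i]], i+1) for every i in range(start, n)
def pvStepB (xs : List Char) (lvl : List (List Char × Nat)) : List (List Char × Nat) :=
  lvl.flatMap (fun ts =>
    (List.range' ts.2 (xs.length - ts.2)).map (fun i => (ts.1 ++ [xs.getD i ' '], i + 1)))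

def pvCombB (xs : List Char) (k : Nat) : List String :=
  (((pvStepB xs)^[k]) [([], 0)]).map (fun ts => String.mk ts.1)

def gerar_combinacoes_letras_alt (letras : String) (tamanho : Option Int) : List String :=
  let xs := letras.toList
  match tamanho with
  | some t => pvCombB xs t.toNat
  | none => (List.range' 1 xs.length).flatMap (fun k => pvCombB xs k)

-- ===== PRECONDITION & SPEC =====
-- Pre_ excludes exactly the inputs where A raises: tamanho = some t with t < 0
-- (itertools.combinations raises ValueError for a negative r); B raises there too.
def Pre_gerar_combinacoes_letras (letras : String) (tamanho : Option Int) : Prop :=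
  0 ≤ tamanho.getD 0

instance (letras : String) (tamanho : Option Int) : Decidable (Pre_gerar_combinacoes_letras letras tamanho) := by
  unfold Pre_gerar_combinacoes_letras; infer_instance

def pvWitness_gerar_combinacoes_letras : String × Option Int := ("abc", some 2)

def Spec_gerar_combinacoes_letras (letras : String) (tamanho : Option Int) (out : List String) : Prop := out = gerar_combinacoes_letras_alt letras tamanho
instance (letras : String) (tamanho : Option Int) (out : List String) : Decidable (Spec_gerar_combinacoes_letras letras tamanho out) := by unfold Spec_gerar_combinacoes_letras; infer_instance

-- ===== CLAIM (what is proved, stated in full; the proofs are below) =====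
def Claim_equal_gerar_combinacoes_letras : Prop := ∀ (letras : String) (tamanho : Option Int), Dom_gerar_combinacoes_letras letras tamanho → Pre_gerar_combinacoes_letras letras tamanho → Spec_gerar_combinacoes_letras letras tamanho (gerar_combinacoes_letras letras tamanho)

-- ===== LEMMAS AND PROOFS =====

theorem pvStepB_append (xs : List Char) (l1 l2 : List (List Char × Nat)) :
    pvStepB xs (l1 ++ l2) = pvStepB xs l1 ++ pvStepB xs l2 := by
  simp [pvStepB]

theorem pvIter_append (xs : List Char) (k : Nat) (l1 l2 : List (List Char × Nat)) :
    ((pvStepB xs)^[k]) (l1 ++ l2) = ((pvStepB xs)^[k]) l1 ++ ((pvStepB xs)^[k]) l2 := by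
  induction k generalizing l1 l2 with
  | zero => simp
  | succ k ih =>
      rw [Function.iterate_succ_apply, Function.iterate_succ_apply,
        Function.iterate_succ_apply, pvStepB_append, ih]

theorem pvIter_flatMap {β : Type} (xs : List Char) (k : Nat)
    (l : List β) (g : β → List (List Char × Nat)) :
    ((pvStepB xs)^[k]) (l.flatMap g) = l.flatMap (fun b => ((pvStepB xs)^[k]) (g b)) := by
  induction l with
  | nil => simp [List.flatMap]; induction k with
      | zero => rfl
      | succ k ih => rw [Function.iterate_succ_apply, show pvStepB xs [] = [] from rfl, ih]
  | cons b l ih =>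
      simp only [List.flatMap_cons]
      rw [pvIter_append, ih]

-- pvCombA on a suffix, unfolded over the index range
theorem pvCombA_succ_range (xs : List Char) (r : Nat) :
    ∀ s, s ≤ xs.length →
    pvCombA (r + 1) (xs.drop s) =
      (List.range' s (xs.length - s)).flatMap
        (fun i => (pvCombA r (xs.drop (i + 1))).map (fun t => xs.getD i ' ' :: t)) := by
  intro s hs
  induction hn : xs.length - s generalizing s with
  | zero =>
      have : s = xs.length := by omega
      subst this
      simp [pvCombA, List.drop_length]
  | succ m ih =>
      have hlt : s < xs.length := by omega
      have hdrop : xs.drop s = xs[s] :: xs.drop (s + 1) := List.drop_eq_getElem_cons hlt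
      rw [hdrop]
      have hr : List.range' s (m + 1) = s :: List.range' (s + 1) m := by
        rw [List.range'_succ]
      rw [hr, List.flatMap_cons]
      have ihs : pvCombA (r + 1) (xs.drop (s + 1)) =
          (List.range' (s + 1) m).flatMap
            (fun i => (pvCombA r (xs.drop (i + 1))).map (fun t => xs.getD i ' ' :: t)) :=
        ih (s + 1) (by omega) (by omega)
      show (pvCombA r (xs.drop (s+1))).map (fun t => xs[s] :: t) ++ pvCombA (r+1) (xs.drop (s+1)) = _
      rw [ihs, List.getD_eq_getElem xs ' ' hlt]

-- single-seed invariant: iterating k steps from (p, s) yields pvCombA k on the suffix,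
-- each prefixed by p
theorem pvIter_single (xs : List Char) (k : Nat) :
    ∀ s, s ≤ xs.length → ∀ p : List Char,
    (((pvStepB xs)^[k]) [(p, s)]).map Prod.fst =
      (pvCombA k (xs.drop s)).map (fun t => p ++ t) := by
  induction k with
  | zero => intro s hs p; simp [pvCombA]
  | succ k ih =>
      intro s hs p
      rw [Function.iterate_succ_apply]
      have hstep : pvStepB xs [(p, s)] =
          (List.range' s (xs.length - s)).map
            (fun i => (p ++ [xs.getD i ' '], i + 1)) := by
        simp [pvStepB]
      rw [hstep,
        show (List.range' s (xs.length - s)).map (fun i => (p ++ [xs.getD i ' '], i + 1)) =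
          (List.range' s (xs.length - s)).flatMap (fun i => [(p ++ [xs.getD i ' '], i + 1)]) from by
            simp [List.map_eq_flatMap],
        pvIter_flatMap]
      simp only [List.map_flatMap]
      rw [pvCombA_succ_range xs k s hs, List.map_flatMap]
      apply List.flatMap_congr
      intro i hi
      have hi' : i < xs.length := by
        have := List.mem_range'.mp hi; omega
      rw [ih (i + 1) (by omega) (p ++ [xs.getD i ' '])]
      simp [Function.comp]

theorem pvCombB_eq (xs : List Char) (k : Nat) :
    pvCombB xs k = (pvCombA k xs).map String.mk := by
  have h := pvIter_single xs k 0 (Nat.zero_le _) []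
  simp only [List.drop_zero, List.nil_append] at h
  unfold pvCombB
  rw [show (fun ts : List Char × Nat => String.mk ts.1) = String.mk ∘ Prod.fst from rfl,
    ← List.map_map, h]
  simp

-- ===== VERDICT (by name: the statement is the Claim_ definition above) =====
theorem gerar_combinacoes_letras_spec : Claim_equal_gerar_combinacoes_letras := by
  intro letras tamanho _ _
  unfold Spec_gerar_combinacoes_letras gerar_combinacoes_letras gerar_combinacoes_letras_alt
  cases tamanho with
  | some t => simp [pvCombB_eq]
  | none =>
      simp only []
      rw [PySem.List.foldl_append_eq_flatMap]
      simp [pvCombB_eq]
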